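-- pv_equiv track=rewrite | github.com/DeckFilter/DeckyZone | py_modules/runtime_profile_utils.py | _split_mapping_blocks
-- ===== SOURCE A (Python) =====
-- def _split_mapping_blocks(profile_yaml):
--     lines = profile_yaml.splitlines()
--     mapping_header_index = None
--     mapping_indent = ""
--
--     for index, line in enumerate(lines):
--         if line.strip() == "mapping:":
--             mapping_header_index = index
--             mapping_indent = line[: len(line) - len(line.lstrip())]
--             break
--
--     if mapping_header_index is None:
--         return profile_yaml, None, None, []
--
--     prefix_lines = lines[: mapping_header_index + 1]
--     suffix_lines = []
--     blocks = []
--     index = mapping_header_index + 1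
--
--     while index < len(lines):
--         line = lines[index]
--         stripped = line.lstrip()
--         indent = line[: len(line) - len(stripped)]
--
--         if (
--             stripped
--             and not stripped.startswith("#")
--             and indent == mapping_indent
--             and not stripped.startswith("-")
--         ):
--             suffix_lines = lines[index:]
--             break
--
--         if stripped.startswith("- name:") and indent == mapping_indent:
--             block_start = index
--             block_indent = indent
--             index += 1
--             while index < len(lines):
--                 next_line = lines[index]
--                 next_stripped = next_line.lstrip()
--                 next_indent = next_line[: len(next_line) - len(next_stripped)]
--                 if next_stripped.startswith("- ") and next_indent == block_indent:
--                     break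
--                 if (
--                     next_stripped
--                     and not next_stripped.startswith("#")
--                     and next_indent == mapping_indent
--                     and not next_stripped.startswith("-")
--                 ):
--                     break
--                 index += 1
--
--             blocks.append(lines[block_start:index])
--             continue
--
--         prefix_lines.append(line)
--         index += 1
--
--     return profile_yaml, prefix_lines, suffix_lines, blocks
-- ===== SOURCE B (Python) =====
-- def _split_mapping_blocks(profile_yaml):
--     lines = profile_yaml.splitlines()
--     header = None
--     indent = ""
--     for i, line in enumerate(lines):
--         if line.strip() == "mapping:":
--             header = i
--             indent = line[: len(line) - len(line.lstrip())]
--             break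
--     if header is None:
--         return profile_yaml, None, None, []
--
--     prefix = lines[: header + 1]
--     suffix = []
--     blocks = []
--     current = None
--
--     for j in range(header + 1, len(lines)):
--         line = lines[j]
--         stripped = line.lstrip()
--         ind = line[: len(line) - len(stripped)]
--         if (
--             stripped
--             and not stripped.startswith("#")
--             and ind == indent
--             and not stripped.startswith("-")
--         ):
--             suffix = lines[j:]
--             break
--         if ind == indent and stripped.startswith("- name:"):
--             if current is not None:
--                 blocks.append(current)
--             current = [line]
--         elif ind == indent and stripped.startswith("- "):
--             if current is not None:
--                 blocks.append(current)
--                 current = None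
--             prefix.append(line)
--         elif current is not None:
--             current.append(line)
--         else:
--             prefix.append(line)
--
--     if current is not None:
--         blocks.append(current)
--     return profile_yaml, prefix, suffix, blocks
-- ===== Notes on version B (the rewrite author's own statement) =====
-- stated objective: simpler
-- what changed: A's nested while loops (an inner scan that finds each block's end, with slice extraction and a 'continue') are replaced by one flat for-pass over the body that classifies every line once, maintaining an optional current-block accumulator that is flushed when a block closes.
import Mathlib
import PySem

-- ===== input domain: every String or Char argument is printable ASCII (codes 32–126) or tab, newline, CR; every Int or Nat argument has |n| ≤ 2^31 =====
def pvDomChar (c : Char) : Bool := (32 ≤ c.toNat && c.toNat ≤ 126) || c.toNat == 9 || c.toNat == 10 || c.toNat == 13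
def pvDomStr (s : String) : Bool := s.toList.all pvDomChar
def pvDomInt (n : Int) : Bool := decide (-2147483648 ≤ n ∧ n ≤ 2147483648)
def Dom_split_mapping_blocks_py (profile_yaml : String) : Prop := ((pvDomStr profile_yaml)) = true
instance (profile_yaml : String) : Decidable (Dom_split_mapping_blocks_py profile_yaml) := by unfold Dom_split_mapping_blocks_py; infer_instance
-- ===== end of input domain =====

-- B replaces A's nested while loops (inner end-of-block scan + slice extraction) by one flat
-- classifying pass with an optional current-block accumulator; objective: simpler.
-- Both while loops advance `index` by at least 1 per iteration and stop at len(lines), so they are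
-- ported as structural recursion on a fuel argument instantiated with lines.length, which is
-- always at least the number of remaining iterations: the ports compute exactly their Pythons.

-- ===== PORT A =====

-- shared by both ports (the Python lines computing `stripped` and `indent` are identical in A and B):
-- stripped = line.lstrip(); indent = line[: len(line) - len(stripped)]
def pvLineParts (line : String) : String × String :=
  let stripped := PySem.Str.lstrip line
  (stripped, PySem.Str.slice line none (some ((PySem.Str.len line : Int) - (PySem.Str.len stripped : Int))))

-- the header-finding for-loop (identical in A and B): first line with line.strip() == "mapping:",
-- returning its index and its indent
def pvFindHeader : List String → Nat → Option (Nat × String)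
  | [], _ => none
  | line :: rest, i =>
    if PySem.Str.strip line = "mapping:" then some (i, (pvLineParts line).2)
    else pvFindHeader rest (i + 1)

-- A's inner while loop: advances index to the end of the current block (or end of input)
def pvInnerA (lines : List String) (mi bi : String) : Nat → Nat → Nat
  | 0, index => index
  | fuel + 1, index =>
    if h : index < lines.length then
      if PySem.Str.startswith (pvLineParts lines[index]).1 "- " = true ∧
          (pvLineParts lines[index]).2 = bi then index
      else if (pvLineParts lines[index]).1 ≠ "" ∧
          PySem.Str.startswith (pvLineParts lines[index]).1 "#" = false ∧
          (pvLineParts lines[index]).2 = mi ∧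
          PySem.Str.startswith (pvLineParts lines[index]).1 "-" = false then index
      else pvInnerA lines mi bi fuel (index + 1)
    else index

-- A's outer while loop
def pvOuterA (lines : List String) (mi : String) :
    Nat → Nat → List String → List (List String) →
    List String × List String × List (List String)
  | 0, _, prefixL, blocks => (prefixL, [], blocks)
  | fuel + 1, index, prefixL, blocks =>
    if h : index < lines.length then
      if (pvLineParts lines[index]).1 ≠ "" ∧
          PySem.Str.startswith (pvLineParts lines[index]).1 "#" = false ∧
          (pvLineParts lines[index]).2 = mi ∧
          PySem.Str.startswith (pvLineParts lines[index]).1 "-" = false then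
        (prefixL, PySem.List.slice lines (some (index : Int)) none, blocks)
      else if PySem.Str.startswith (pvLineParts lines[index]).1 "- name:" = true ∧
          (pvLineParts lines[index]).2 = mi then
        pvOuterA lines mi fuel
          (pvInnerA lines mi (pvLineParts lines[index]).2 lines.length (index + 1)) prefixL
          (blocks ++ [PySem.List.slice lines (some (index : Int))
            (some ((pvInnerA lines mi (pvLineParts lines[index]).2 lines.length (index + 1) : Nat) : Int))])
      else
        pvOuterA lines mi fuel (index + 1) (prefixL ++ [lines[index]]) blocks
    else (prefixL, [], blocks)

def split_mapping_blocks_py (profile_yaml : String) :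
    String × Option (List String) × Option (List String) × List (List String) :=
  let lines := PySem.Str.splitlines profile_yaml
  match pvFindHeader lines 0 with
  | none => (profile_yaml, none, none, [])
  | some (h, mi) =>
    let prefixL := PySem.List.slice lines none (some ((h : Int) + 1))
    let r := pvOuterA lines mi lines.length (h + 1) prefixL []
    (profile_yaml, some r.1, some r.2.1, r.2.2)

-- ===== PORT B =====

-- B's single flat pass over the body, with an optional open block `cur`
def pvLoopB (lines : List String) (mi : String) :
    Nat → Nat → List String → List (List String) → Option (List String) →
    List String × List String × List (List String)
  | 0, _, prefixL, blocks, cur => (prefixL, [], blocks ++ cur.toList)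
  | fuel + 1, index, prefixL, blocks, cur =>
    if h : index < lines.length then
      if (pvLineParts lines[index]).1 ≠ "" ∧
          PySem.Str.startswith (pvLineParts lines[index]).1 "#" = false ∧
          (pvLineParts lines[index]).2 = mi ∧
          PySem.Str.startswith (pvLineParts lines[index]).1 "-" = false then
        -- suffix found: break, final flush of the open block
        (prefixL, PySem.List.slice lines (some (index : Int)) none, blocks ++ cur.toList)
      else if (pvLineParts lines[index]).2 = mi ∧
          PySem.Str.startswith (pvLineParts lines[index]).1 "- name:" = true then
        pvLoopB lines mi fuel (index + 1) prefixL (blocks ++ cur.toList) (some [lines[index]])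
      else if (pvLineParts lines[index]).2 = mi ∧
          PySem.Str.startswith (pvLineParts lines[index]).1 "- " = true then
        pvLoopB lines mi fuel (index + 1) (prefixL ++ [lines[index]]) (blocks ++ cur.toList) none
      else
        match cur with
        | some c => pvLoopB lines mi fuel (index + 1) prefixL blocks (some (c ++ [lines[index]]))
        | none => pvLoopB lines mi fuel (index + 1) (prefixL ++ [lines[index]]) blocks none
    else (prefixL, [], blocks ++ cur.toList)

def split_mapping_blocks_py_alt (profile_yaml : String) :
    String × Option (List String) × Option (List String) × List (List String) :=
  let lines := PySem.Str.splitlines profile_yaml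
  match pvFindHeader lines 0 with
  | none => (profile_yaml, none, none, [])
  | some (h, mi) =>
    let prefixL := PySem.List.slice lines none (some ((h : Int) + 1))
    let r := pvLoopB lines mi lines.length (h + 1) prefixL [] none
    (profile_yaml, some r.1, some r.2.1, r.2.2)

-- ===== PRECONDITION & SPEC =====
def Spec_split_mapping_blocks_py (profile_yaml : String) (out : String × Option (List String) × Option (List String) × List (List String)) : Prop := out = split_mapping_blocks_py_alt profile_yaml
instance (profile_yaml : String) (out : String × Option (List String) × Option (List String) × List (List String)) : Decidable (Spec_split_mapping_blocks_py profile_yaml out) := by unfold Spec_split_mapping_blocks_py; infer_instance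

-- ===== CLAIM (what is proved, stated in full; the proofs are below) =====
def Claim_equal_split_mapping_blocks_py : Prop := ∀ (profile_yaml : String), Dom_split_mapping_blocks_py profile_yaml → Spec_split_mapping_blocks_py profile_yaml (split_mapping_blocks_py profile_yaml)

-- ===== LEMMAS AND PROOFS =====

-- "- name:" starts with "- ", and "- " starts with "-"
theorem pv_sw_name_sw_dash_space (s : String)
    (hs : PySem.Str.startswith s "- name:" = true) : PySem.Str.startswith s "- " = true := by
  simp only [PySem.Str.startswith_eq] at *
  rw [PySem.Chars.startswith_iff] at *
  exact List.IsPrefix.trans (by decide) hs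

theorem pv_sw_dash_space_sw_dash (s : String)
    (hs : PySem.Str.startswith s "- " = true) : PySem.Str.startswith s "-" = true := by
  simp only [PySem.Str.startswith_eq] at *
  rw [PySem.Chars.startswith_iff] at *
  exact List.IsPrefix.trans (by decide) hs

-- past the end, the loops return regardless of fuel
theorem pvInnerA_of_ge (lines : List String) (mi bi : String) (index : Nat)
    (h : ¬ index < lines.length) : ∀ fuel, pvInnerA lines mi bi fuel index = index := by
  intro fuel
  cases fuel with
  | zero => rfl
  | succ fuel => rw [pvInnerA, dif_neg h]

theorem pvLoopB_of_ge (lines : List String) (mi : String) (index : Nat)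
    (prefixL : List String) (blocks : List (List String)) (cur : Option (List String))
    (h : ¬ index < lines.length) :
    ∀ fuel, pvLoopB lines mi fuel index prefixL blocks cur = (prefixL, [], blocks ++ cur.toList) := by
  intro fuel
  cases fuel with
  | zero => rfl
  | succ fuel => rw [pvLoopB, dif_neg h]

theorem pvInnerA_ge (lines : List String) (mi bi : String) :
    ∀ fuel index, index ≤ pvInnerA lines mi bi fuel index := by
  intro fuel
  induction fuel with
  | zero => intro index; exact le_refl _
  | succ fuel ih =>
    intro index
    rw [pvInnerA]
    split
    · split
      · exact le_refl _
      · split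
        · exact le_refl _
        · exact le_trans (Nat.le_succ index) (ih (index + 1))
    · exact le_refl _

-- with enough fuel, one exact step of A's inner loop (fuel is preserved)
theorem pvInnerA_congr (lines : List String) (mi bi : String) :
    ∀ fuel fuel' index, lines.length - index ≤ fuel → lines.length - index ≤ fuel' →
      pvInnerA lines mi bi fuel index = pvInnerA lines mi bi fuel' index := by
  intro fuel
  induction fuel with
  | zero =>
    intro fuel' index h h'
    have hL : ¬ index < lines.length := by omega
    rw [pvInnerA_of_ge lines mi bi index hL, pvInnerA_of_ge lines mi bi index hL]
  | succ fuel ih =>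
    intro fuel' index h h'
    by_cases hL : index < lines.length
    · cases fuel' with
      | zero => omega
      | succ fuel' =>
        rw [pvInnerA, dif_pos hL, pvInnerA, dif_pos hL]
        split
        · rfl
        · split
          · rfl
          · exact ih fuel' (index + 1) (by omega) (by omega)
    · rw [pvInnerA_of_ge lines mi bi index hL, pvInnerA_of_ge lines mi bi index hL]

theorem pvInnerA_step (lines : List String) (mi bi : String) (fuel index : Nat)
    (hL : index < lines.length) (h : lines.length - index ≤ fuel) :
    pvInnerA lines mi bi fuel index =
      if PySem.Str.startswith (pvLineParts lines[index]).1 "- " = true ∧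
          (pvLineParts lines[index]).2 = bi then index
      else if (pvLineParts lines[index]).1 ≠ "" ∧
          PySem.Str.startswith (pvLineParts lines[index]).1 "#" = false ∧
          (pvLineParts lines[index]).2 = mi ∧
          PySem.Str.startswith (pvLineParts lines[index]).1 "-" = false then index
      else pvInnerA lines mi bi fuel (index + 1) := by
  cases fuel with
  | zero => omega
  | succ fuel =>
    rw [pvInnerA, dif_pos hL]
    split
    · rfl
    · split
      · rfl
      · exact pvInnerA_congr lines mi bi fuel (fuel + 1) (index + 1) (by omega) (by omega)

-- fuel irrelevance for B's loop (any sufficient fuel computes the same result)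
theorem pvLoopB_congr (lines : List String) (mi : String) :
    ∀ fuel fuel' index prefixL blocks cur,
      lines.length - index ≤ fuel → lines.length - index ≤ fuel' →
      pvLoopB lines mi fuel index prefixL blocks cur =
        pvLoopB lines mi fuel' index prefixL blocks cur := by
  intro fuel
  induction fuel with
  | zero =>
    intro fuel' index prefixL blocks cur h h'
    have hL : ¬ index < lines.length := by omega
    rw [pvLoopB_of_ge lines mi index prefixL blocks cur hL,
      pvLoopB_of_ge lines mi index prefixL blocks cur hL]
  | succ fuel ih =>
    intro fuel' index prefixL blocks cur h h'
    by_cases hL : index < lines.length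
    · cases fuel' with
      | zero => omega
      | succ fuel' =>
        rw [pvLoopB, dif_pos hL, pvLoopB, dif_pos hL]
        split
        · rfl
        · split
          · exact ih fuel' (index + 1) _ _ _ (by omega) (by omega)
          · split
            · exact ih fuel' (index + 1) _ _ _ (by omega) (by omega)
            · cases cur with
              | some c => exact ih fuel' (index + 1) _ _ _ (by omega) (by omega)
              | none => exact ih fuel' (index + 1) _ _ _ (by omega) (by omega)
    · rw [pvLoopB_of_ge lines mi index prefixL blocks cur hL,
        pvLoopB_of_ge lines mi index prefixL blocks cur hL]

-- B with an open block `cur` runs to the end of that block (A's inner-loop index) and flushes it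
theorem pv_sim_inner (lines : List String) (mi : String) :
    ∀ fuel index prefixL blocks cur, lines.length - index ≤ fuel →
      pvLoopB lines mi fuel index prefixL blocks (some cur) =
        pvLoopB lines mi fuel (pvInnerA lines mi mi lines.length index) prefixL
          (blocks ++
            [cur ++ (lines.drop index).take (pvInnerA lines mi mi lines.length index - index)])
          none := by
  intro fuel
  induction fuel with
  | zero =>
    intro index prefixL blocks cur h
    have hL : ¬ index < lines.length := by omega
    rw [pvInnerA_of_ge lines mi mi index hL lines.length]
    simp [pvLoopB]
  | succ fuel ih =>
    intro index prefixL blocks cur h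
    by_cases hL : index < lines.length
    · rw [pvInnerA_step lines mi mi lines.length index hL (by omega)]
      by_cases h1 : PySem.Str.startswith (pvLineParts lines[index]).1 "- " = true ∧
          (pvLineParts lines[index]).2 = mi
      · rw [if_pos h1]
        have hS : ¬ ((pvLineParts lines[index]).1 ≠ "" ∧
            PySem.Str.startswith (pvLineParts lines[index]).1 "#" = false ∧
            (pvLineParts lines[index]).2 = mi ∧
            PySem.Str.startswith (pvLineParts lines[index]).1 "-" = false) := by
          intro hS
          have := pv_sw_dash_space_sw_dash _ h1.1
          rw [hS.2.2.2] at this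
          exact Bool.false_ne_true this
        simp only [Nat.sub_self, List.take_zero, List.append_nil]
        conv_lhs => rw [pvLoopB, dif_pos hL]
        conv_rhs => rw [pvLoopB, dif_pos hL]
        rw [if_neg hS, if_neg hS]
        by_cases h2 : (pvLineParts lines[index]).2 = mi ∧
            PySem.Str.startswith (pvLineParts lines[index]).1 "- name:" = true
        · rw [if_pos h2, if_pos h2]
          simp
        · rw [if_neg h2, if_neg h2, if_pos ⟨h1.2, h1.1⟩, if_pos ⟨h1.2, h1.1⟩]
          simp
      · rw [if_neg h1]
        by_cases hS : (pvLineParts lines[index]).1 ≠ "" ∧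
            PySem.Str.startswith (pvLineParts lines[index]).1 "#" = false ∧
            (pvLineParts lines[index]).2 = mi ∧
            PySem.Str.startswith (pvLineParts lines[index]).1 "-" = false
        · rw [if_pos hS]
          simp only [Nat.sub_self, List.take_zero, List.append_nil]
          conv_lhs => rw [pvLoopB, dif_pos hL]
          conv_rhs => rw [pvLoopB, dif_pos hL]
          rw [if_pos hS, if_pos hS]
          simp
        · rw [if_neg hS]
          have hName : ¬ ((pvLineParts lines[index]).2 = mi ∧
              PySem.Str.startswith (pvLineParts lines[index]).1 "- name:" = true) := by
            intro hc
            exact h1 ⟨pv_sw_name_sw_dash_space _ hc.2, hc.1⟩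
          have hDash : ¬ ((pvLineParts lines[index]).2 = mi ∧
              PySem.Str.startswith (pvLineParts lines[index]).1 "- " = true) := by
            intro hc
            exact h1 ⟨hc.2, hc.1⟩
          conv_lhs => rw [pvLoopB, dif_pos hL]
          rw [if_neg hS, if_neg hName, if_neg hDash]
          dsimp only
          rw [ih (index + 1) prefixL blocks (cur ++ [lines[index]]) (by omega)]
          have hge : index + 1 ≤ pvInnerA lines mi mi lines.length (index + 1) :=
            pvInnerA_ge lines mi mi lines.length (index + 1)
          rw [pvLoopB_congr lines mi fuel (fuel + 1) _ _ _ _ (by omega) (by omega)]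
          congr 2
          rw [← List.getElem_cons_drop hL]
          have : pvInnerA lines mi mi lines.length (index + 1) - index =
              (pvInnerA lines mi mi lines.length (index + 1) - (index + 1)) + 1 := by omega
          rw [this, List.take_succ_cons]
          simp
    · rw [pvInnerA_of_ge lines mi mi index hL lines.length]
      rw [pvLoopB_of_ge lines mi index _ _ _ hL, pvLoopB_of_ge lines mi index _ _ _ hL]
      simp

-- A's outer loop equals B's flat pass with no open block
theorem pv_main (lines : List String) (mi : String) :
    ∀ fuel index prefixL blocks, lines.length - index ≤ fuel →
      pvOuterA lines mi fuel index prefixL blocks =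
        pvLoopB lines mi fuel index prefixL blocks none := by
  intro fuel
  induction fuel with
  | zero =>
    intro index prefixL blocks h
    simp [pvOuterA, pvLoopB]
  | succ fuel ih =>
    intro index prefixL blocks h
    by_cases hL : index < lines.length
    · rw [pvOuterA, dif_pos hL]
      conv_rhs => rw [pvLoopB, dif_pos hL]
      by_cases hS : (pvLineParts lines[index]).1 ≠ "" ∧
          PySem.Str.startswith (pvLineParts lines[index]).1 "#" = false ∧
          (pvLineParts lines[index]).2 = mi ∧
          PySem.Str.startswith (pvLineParts lines[index]).1 "-" = false
      · rw [if_pos hS, if_pos hS]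
        simp
      · rw [if_neg hS, if_neg hS]
        by_cases hN : PySem.Str.startswith (pvLineParts lines[index]).1 "- name:" = true ∧
            (pvLineParts lines[index]).2 = mi
        · rw [if_pos hN, if_pos ⟨hN.2, hN.1⟩, hN.2]
          have hge : index + 1 ≤ pvInnerA lines mi mi lines.length (index + 1) :=
            pvInnerA_ge lines mi mi lines.length (index + 1)
          rw [ih (pvInnerA lines mi mi lines.length (index + 1)) prefixL _ (by omega)]
          rw [pv_sim_inner lines mi fuel (index + 1) prefixL _ [lines[index]] (by omega)]
          simp only [Option.toList_none, List.append_nil]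
          congr 2
          rw [PySem.List.slice_natCast]
          rw [← List.getElem_cons_drop hL]
          have : pvInnerA lines mi mi lines.length (index + 1) - index =
              (pvInnerA lines mi mi lines.length (index + 1) - (index + 1)) + 1 := by omega
          rw [this, List.take_succ_cons]
          simp
        · rw [if_neg hN]
          rw [ih (index + 1) (prefixL ++ [lines[index]]) blocks (by omega)]
          have hName : ¬ ((pvLineParts lines[index]).2 = mi ∧
              PySem.Str.startswith (pvLineParts lines[index]).1 "- name:" = true) := by
            intro hc
            exact hN ⟨hc.2, hc.1⟩
          rw [if_neg hName]
          by_cases hD : (pvLineParts lines[index]).2 = mi ∧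
              PySem.Str.startswith (pvLineParts lines[index]).1 "- " = true
          · rw [if_pos hD]
            simp
          · rw [if_neg hD]
    · rw [pvOuterA, dif_neg hL, pvLoopB, dif_neg hL]
      simp

-- ===== VERDICT (by name: the statement is the Claim_ definition above) =====
theorem split_mapping_blocks_py_spec : Claim_equal_split_mapping_blocks_py := by
  intro profile_yaml _
  unfold Spec_split_mapping_blocks_py split_mapping_blocks_py split_mapping_blocks_py_alt
  cases hF : pvFindHeader (PySem.Str.splitlines profile_yaml) 0 with
  | none => simp only [hF]
  | some p =>
    obtain ⟨h, mi⟩ := p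
    simp only [hF]
    rw [pv_main _ _ _ (h + 1) _ _ (by omega)]
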